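-- pv_equiv track=rewrite | github.com/icedmoch/doorsmashorpass | backend/nutrition_utils.py | get_available_dates
-- ===== SOURCE A (Python) =====
-- from typing import List, Dict
--
-- def get_available_dates(json_data: dict) -> List[str]:
--     """Get list of available dates from the JSON file"""
--     dates = set()
--     for location, entries in json_data.items():
--         for entry in entries:
--             date = entry.get("date", "")
--             if date:
--                 dates.add(date)
--
--     return sorted(list(dates))
-- ===== SOURCE B (Python) =====
-- def get_available_dates(json_data: dict):
--     """Get list of available dates from the JSON file"""
--     flat = []
--     for location, entries in json_data.items():
--         for entry in entries:
--             date = entry.get("date", "")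
--             if date:
--                 flat.append(date)
--     flat.sort()
--     result = []
--     prev = None
--     for d in flat:
--         if d != prev:
--             result.append(d)
--             prev = d
--     return result
-- ===== Notes on version B (the rewrite author's own statement) =====
-- stated objective: alternative
-- what changed: Replaces hash-set deduplication followed by sorting with collecting all dates into a flat list (duplicates kept), sorting it, and one linear pass that emits each element only when it differs from the previous one.
import Mathlib
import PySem

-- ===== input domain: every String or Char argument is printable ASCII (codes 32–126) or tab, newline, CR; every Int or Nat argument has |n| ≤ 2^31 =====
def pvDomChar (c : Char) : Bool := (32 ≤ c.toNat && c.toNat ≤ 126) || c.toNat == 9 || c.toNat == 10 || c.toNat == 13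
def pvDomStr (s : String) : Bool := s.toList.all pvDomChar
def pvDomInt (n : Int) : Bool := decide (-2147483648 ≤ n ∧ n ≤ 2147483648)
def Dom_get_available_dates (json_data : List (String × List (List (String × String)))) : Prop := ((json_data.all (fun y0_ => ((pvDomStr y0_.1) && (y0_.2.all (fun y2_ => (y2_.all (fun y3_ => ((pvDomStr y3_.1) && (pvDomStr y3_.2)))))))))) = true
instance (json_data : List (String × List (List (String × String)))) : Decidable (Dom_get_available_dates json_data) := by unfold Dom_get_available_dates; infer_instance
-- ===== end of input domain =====

-- B collects all non-empty dates into a flat list, sorts it, and removes adjacent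
-- duplicates in one linear pass, instead of A's set-based dedup then sort (objective: alternative).

-- ===== PORT A =====
def get_available_dates (json_data : List (String × List (List (String × String)))) : List String :=
  let dates : PySem.Set String :=
    json_data.foldl (fun s p =>
      p.2.foldl (fun s2 entry =>
        let date := PySem.Dict.getD (PySem.Dict.mk entry) "date" ""
        if date ≠ "" then PySem.Set.add s2 date else s2) s) PySem.Set.empty
  PySem.List.sorted dates (fun x => x) false

-- ===== PORT B =====
-- the 'if d != prev' step of B's final dedup loop
def pvDedupStep (st : List String × Option String) (d : String) : List String × Option String :=
  if st.2 ≠ some d then (st.1 ++ [d], some d) else st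

def get_available_dates_alt (json_data : List (String × List (List (String × String)))) : List String :=
  let flat : List String :=
    json_data.foldl (fun acc p =>
      p.2.foldl (fun acc2 entry =>
        let date := PySem.Dict.getD (PySem.Dict.mk entry) "date" ""
        if date ≠ "" then acc2 ++ [date] else acc2) acc) []
  let sortedFlat := PySem.List.sorted flat (fun x => x) false
  (sortedFlat.foldl pvDedupStep ([], none)).1

-- ===== PRECONDITION & SPEC =====
def Spec_get_available_dates (json_data : List (String × List (List (String × String)))) (out : List String) : Prop := out = get_available_dates_alt json_data
instance (json_data : List (String × List (List (String × String)))) (out : List String) : Decidable (Spec_get_available_dates json_data out) := by unfold Spec_get_available_dates; infer_instance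

-- ===== CLAIM (what is proved, stated in full; the proofs are below) =====
def Claim_equal_get_available_dates : Prop := ∀ (json_data : List (String × List (List (String × String)))), Dom_get_available_dates json_data → Spec_get_available_dates json_data (get_available_dates json_data)

-- ===== LEMMAS AND PROOFS =====

-- the flat sequence of non-empty dates, in visiting order
def pvDates (json_data : List (String × List (List (String × String)))) : List String :=
  json_data.flatMap (fun p => p.2.filterMap (fun entry =>
    let date := PySem.Dict.getD (PySem.Dict.mk entry) "date" ""
    if date ≠ "" then some date else none))

theorem pvA_inner (es : List (List (String × String))) (s : PySem.Set String) :
    es.foldl (fun s2 entry =>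
        let date := PySem.Dict.getD (PySem.Dict.mk entry) "date" ""
        if date ≠ "" then PySem.Set.add s2 date else s2) s
    = (es.filterMap (fun entry =>
        let date := PySem.Dict.getD (PySem.Dict.mk entry) "date" ""
        if date ≠ "" then some date else none)).foldl PySem.Set.add s := by
  induction es generalizing s with
  | nil => rfl
  | cons e t ih =>
    simp only [List.foldl_cons, List.filterMap_cons]
    split <;> simp_all

theorem pvA_fold (L : List (String × List (List (String × String)))) (s : PySem.Set String) :
    L.foldl (fun s p =>
      p.2.foldl (fun s2 entry =>
        let date := PySem.Dict.getD (PySem.Dict.mk entry) "date" ""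
        if date ≠ "" then PySem.Set.add s2 date else s2) s) s
    = (pvDates L).foldl PySem.Set.add s := by
  induction L generalizing s with
  | nil => rfl
  | cons p t ih =>
    simp only [List.foldl_cons, pvDates, List.flatMap_cons, List.foldl_append]
    rw [ih, pvA_inner]
    rfl

theorem pvB_inner (es : List (List (String × String))) (acc : List String) :
    es.foldl (fun acc2 entry =>
        let date := PySem.Dict.getD (PySem.Dict.mk entry) "date" ""
        if date ≠ "" then acc2 ++ [date] else acc2) acc
    = acc ++ es.filterMap (fun entry =>
        let date := PySem.Dict.getD (PySem.Dict.mk entry) "date" ""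
        if date ≠ "" then some date else none) := by
  induction es generalizing acc with
  | nil => simp
  | cons e t ih =>
    simp only [List.foldl_cons, List.filterMap_cons]
    split <;> simp_all

theorem pvB_fold (L : List (String × List (List (String × String)))) (acc : List String) :
    L.foldl (fun acc p =>
      p.2.foldl (fun acc2 entry =>
        let date := PySem.Dict.getD (PySem.Dict.mk entry) "date" ""
        if date ≠ "" then acc2 ++ [date] else acc2) acc) acc
    = acc ++ pvDates L := by
  induction L generalizing acc with
  | nil => simp [pvDates]
  | cons p t ih =>
    simp only [List.foldl_cons, pvDates, List.flatMap_cons]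
    rw [ih, pvB_inner]
    simp [pvDates]

-- invariant of B's dedup loop on a ≤-sorted input
theorem pvDedup_go (l : List String) (hl : l.Pairwise (· ≤ ·)) :
    ∀ (res : List String) (prev : Option String),
      res.Pairwise (· < ·) →
      (∀ q, prev = some q → (∀ r ∈ res, r ≤ q) ∧ q ∈ res ∧ ∀ x ∈ l, q ≤ x) →
      (prev = none → res = []) →
      ((l.foldl pvDedupStep (res, prev)).1.Pairwise (· < ·) ∧
        ∀ x, x ∈ (l.foldl pvDedupStep (res, prev)).1 ↔ x ∈ res ∨ x ∈ l) := by
  induction l with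
  | nil => intro res prev h1 _ _; exact ⟨h1, by simp⟩
  | cons d t ih =>
    intro res prev h1 h2 h3
    have ht : t.Pairwise (· ≤ ·) := hl.tail
    have hdt : ∀ x ∈ t, d ≤ x := fun x hx => List.rel_of_pairwise_cons hl hx
    simp only [List.foldl_cons, pvDedupStep]
    by_cases hc : prev ≠ some d
    · simp only [if_pos hc]
      have hle : ∀ r ∈ res, r < d := by
        intro r hr
        cases prev with
        | none => simp [h3 rfl] at hr
        | some q =>
          obtain ⟨hq1, _, hq3⟩ := h2 q rfl
          have h4 : q ≤ d := hq3 d (by simp)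
          have h5 : r ≤ q := hq1 r hr
          have h6 : r ≤ d := le_trans h5 h4
          rcases lt_or_eq_of_le h6 with h | h
          · exact h
          · exfalso
            apply hc
            have : q = d := le_antisymm h4 (h ▸ h5)
            rw [this]
      have hres' : (res ++ [d]).Pairwise (· < ·) := by
        rw [List.pairwise_append]
        refine ⟨h1, by simp, ?_⟩
        intro r hr b hb
        simp at hb
        rw [hb]
        exact hle r hr
      have h2' : ∀ q, (some d : Option String) = some q →
          (∀ r ∈ res ++ [d], r ≤ q) ∧ q ∈ res ++ [d] ∧ ∀ x ∈ t, q ≤ x := by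
        intro q hq
        injection hq with hq
        subst hq
        refine ⟨?_, by simp, hdt⟩
        intro r hr
        rcases List.mem_append.1 hr with h | h
        · exact le_of_lt (hle r h)
        · simp at h; simp [h]
      have := ih ht (res ++ [d]) (some d) hres' h2' (by intro h; cases h)
      refine ⟨this.1, fun x => ?_⟩
      rw [this.2 x]
      simp only [List.mem_append, List.mem_singleton, List.mem_cons]
      tauto
    · simp only [if_neg hc]
      push_neg at hc
      obtain ⟨_, hq2, _⟩ := h2 d hc
      have := ih ht res prev h1
        (by
          intro q hq
          obtain ⟨a1, a2, a3⟩ := h2 q hq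
          exact ⟨a1, a2, fun x hx => a3 x (by simp [hx])⟩)
        h3
      refine ⟨this.1, fun x => ?_⟩
      rw [this.2 x]
      simp only [List.mem_cons]
      constructor
      · tauto
      · rintro (h | h | h)
        · exact Or.inl h
        · subst h; exact Or.inl hq2
        · exact Or.inr h

-- ===== VERDICT (by name: the statement is the Claim_ definition above) =====
theorem get_available_dates_spec : Claim_equal_get_available_dates := by
  intro jd _
  unfold Spec_get_available_dates get_available_dates get_available_dates_alt
  simp only
  rw [pvA_fold, pvB_fold]
  simp only [List.nil_append]
  set ds := pvDates jd with hds
  have hofl : (ds.foldl PySem.Set.add PySem.Set.empty) = PySem.Set.ofList ds := by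
    rw [PySem.Set.ofList_eq_foldl]; rfl
  rw [hofl]
  set S := PySem.List.sorted ds (fun x => x) false with hS
  have hSp : S.Pairwise (· ≤ ·) := by
    simpa using PySem.List.sorted_pairwise ds (fun x => x)
  have hgo := pvDedup_go S hSp [] none (by simp) (by intro q h; cases h) (fun _ => rfl)
  set R := (S.foldl pvDedupStep ([], none)).1 with hR
  have hmemR : ∀ x, x ∈ R ↔ x ∈ ds := by
    intro x
    rw [hgo.2 x]
    simp [hS, PySem.List.mem_sorted]
  have hnodupR : R.Nodup := hgo.1.imp ne_of_lt
  have hperm : R.Perm (PySem.Set.ofList ds) := by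
    rw [List.perm_ext_iff_of_nodup hnodupR (PySem.Set.nodup_ofList ds)]
    intro a
    rw [hmemR a, PySem.Set.mem_ofList]
  exact PySem.List.sorted_eq_of_perm_of_pairwise_lt _ _ (fun x => x) hperm hgo.1
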